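-- pv_equiv track=rewrite | github.com/natalka1122/advent_of_code | 2025/10/main1.py | f
-- ===== SOURCE A (Python) =====
-- from queue import Queue
--
-- def f(start: int, target: int, togglers: list[int]) -> int:
--     if start == target:
--         return 0
--     Q: Queue[tuple[int, int]] = Queue()
--     Q.put((start, 0))
--     visited: set[int] = set([start])
--     while Q.qsize() > 0:
--         current, steps = Q.get()
--         for t in togglers:
--             value = current ^ t
--             if value in visited:
--                 continue
--             visited.add(value)
--             if value == target:
--                 return steps + 1
--             Q.put((value, steps + 1))
--     raise NotImplementedError
-- ===== SOURCE B (Python) =====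
-- def f(start: int, target: int, togglers: list[int]) -> int:
--     # Bidirectional BFS: grow one frontier from start and one from target,
--     # each with its own visited set, expanding the smaller frontier per round;
--     # when a freshly generated level intersects the opposite visited set the
--     # answer is the sum of the two depths.  (XOR edges are symmetric, so the
--     # backward search uses the same togglers.)
--     if start == target:
--         return 0
--     seen_a, seen_b = {start}, {target}
--     front_a, front_b = [start], [target]
--     da = db = 0
--     while front_a and front_b:
--         if len(front_a) <= len(front_b):
--             da += 1
--             new = []
--             for x in front_a:
--                 for t in togglers:
--                     v = x ^ t
--                     if v not in seen_a:
--                         seen_a.add(v)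
--                         new.append(v)
--             if any(v in seen_b for v in new):
--                 return da + db
--             front_a = new
--         else:
--             db += 1
--             new = []
--             for x in front_b:
--                 for t in togglers:
--                     v = x ^ t
--                     if v not in seen_b:
--                         seen_b.add(v)
--                         new.append(v)
--             if any(v in seen_a for v in new):
--                 return da + db
--             front_b = new
--     raise NotImplementedError
-- ===== Notes on version B (the rewrite author's own statement) =====
-- stated objective: faster
-- what changed: Replaces A's single-source FIFO-queue BFS over XOR states by a bidirectional level-synchronized BFS: one frontier grows from start and one from target (XOR edges are symmetric), the smaller frontier is expanded each round, and the answer is the sum of the two depths when a freshly generated level intersects the opposite visited set.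
import Mathlib
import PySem

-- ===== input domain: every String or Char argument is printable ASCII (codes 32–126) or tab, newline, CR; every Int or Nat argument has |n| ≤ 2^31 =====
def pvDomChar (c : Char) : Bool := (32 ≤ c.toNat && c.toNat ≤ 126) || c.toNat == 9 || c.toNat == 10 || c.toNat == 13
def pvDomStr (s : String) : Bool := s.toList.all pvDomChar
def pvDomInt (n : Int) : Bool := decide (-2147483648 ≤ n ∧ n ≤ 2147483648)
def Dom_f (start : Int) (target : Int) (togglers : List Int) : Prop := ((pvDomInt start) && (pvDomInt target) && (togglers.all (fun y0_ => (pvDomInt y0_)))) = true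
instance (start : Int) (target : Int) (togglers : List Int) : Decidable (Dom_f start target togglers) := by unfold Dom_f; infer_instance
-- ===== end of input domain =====

-- B replaces A's single-source FIFO BFS by a BIDIRECTIONAL level-synchronized BFS:
-- one frontier grows from start, one from target (XOR edges are symmetric), the
-- smaller frontier is expanded each round, and the answer is the sum of the two
-- depths when a fresh level meets the opposite visited set (measured faster on the
-- generated large inputs: each search only goes half the distance).

-- ===== PORT A =====
-- the inner `for t in togglers` loop of A (early `return steps + 1` = .inl)
def innerA (target current steps : Int) : List Int → List (Int × Int) → PySem.Set Int → Sum Int (List (Int × Int) × PySem.Set Int)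
  | [], q, v => .inr (q, v)
  | t :: ts, q, v =>
    let value := PySem.Int.bxor current t
    if PySem.Set.contains v value then innerA target current steps ts q v
    else
      let v' := PySem.Set.add v value
      if value = target then .inl (steps + 1)
      else innerA target current steps ts (q ++ [(value, steps + 1)]) v'

-- the `while Q.qsize() > 0` loop; queue modelled as a list (put = append, get = head).
-- -1 marks the `raise NotImplementedError` exit (excluded by Pre_f).  The fuel
-- 2 ^ togglers.length + 2 is a totality guard only: it exceeds the number of loop
-- iterations, which is bounded by the queue insertions (≤ 1 + |visited|, and visited
-- stays inside the XOR-coset of start, of size ≤ 2 ^ togglers.length).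
def loopA (ts : List Int) (target : Int) : Nat → List (Int × Int) → PySem.Set Int → Int
  | 0, _, _ => -1
  | fuel + 1, q, v =>
    match q with
    | [] => -1
    | (current, steps) :: rest =>
      match innerA target current steps ts rest v with
      | .inl r => r
      | .inr (q', v') => loopA ts target fuel q' v'

def f (start : Int) (target : Int) (togglers : List Int) : Int :=
  if start = target then 0
  else loopA togglers target (2 ^ togglers.length + 2) [(start, 0)] (PySem.Set.ofList [start])

-- ===== PORT B =====
-- inner `for t in togglers` loop of one node of the expanded frontier:
-- grows this side's seen set and the freshly discovered level `new`
def bInner (x : Int) : List Int → PySem.Set Int → List Int → PySem.Set Int × List Int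
  | [], seen, new => (seen, new)
  | t :: ts, seen, new =>
    let v := PySem.Int.bxor x t
    if PySem.Set.contains seen v then bInner x ts seen new
    else bInner x ts (PySem.Set.add seen v) (new ++ [v])

-- `for x in front:` — expand a whole frontier one level
def bLevel (ts : List Int) : List Int → PySem.Set Int → List Int → PySem.Set Int × List Int
  | [], seen, new => (seen, new)
  | x :: xs, seen, new =>
    match bInner x ts seen new with
    | (seen', new') => bLevel ts xs seen' new'

-- `while front_a and front_b:` — alternate the two searches, expanding the smaller
-- frontier; -1 marks the `raise NotImplementedError` exit (excluded by Pre_f).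
-- The fuel 2 ^ togglers.length + 2 is a totality guard only: each round grows one of
-- the seen sets, which stay inside XOR-cosets of size ≤ 2 ^ togglers.length.
def bLoop (ts : List Int) : Nat → List Int → List Int → PySem.Set Int → PySem.Set Int → Int → Int → Int
  | 0, _, _, _, _, _, _ => -1
  | fuel + 1, fa, fb, sa, sb, da, db =>
    match fa, fb with
    | [], _ => -1
    | _, [] => -1
    | _ :: _, _ :: _ =>
      if fa.length ≤ fb.length then
        match bLevel ts fa sa [] with
        | (sa', new) =>
          if new.any (fun v => PySem.Set.contains sb v) then (da + 1) + db
          else bLoop ts fuel new fb sa' sb (da + 1) db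
      else
        match bLevel ts fb sb [] with
        | (sb', new) =>
          if new.any (fun v => PySem.Set.contains sa v) then da + (db + 1)
          else bLoop ts fuel fa new sa sb' da (db + 1)

def f_alt (start : Int) (target : Int) (togglers : List Int) : Int :=
  if start = target then 0
  else bLoop togglers (2 ^ togglers.length + 2) [start] [target]
    (PySem.Set.ofList [start]) (PySem.Set.ofList [target]) 0 0

-- ===== PRECONDITION & SPEC =====
-- XOR of a list (used only to state reachability in Pre_f)
def xorFold (l : List Int) : Int := l.foldr PySem.Int.bxor 0

-- A raises NotImplementedError exactly when start ≠ target and the difference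
-- start ^ target is not the XOR of any sublist of togglers (target unreachable);
-- Pre_f excludes exactly those inputs.
def Pre_f (start : Int) (target : Int) (togglers : List Int) : Prop :=
  start = target ∨ PySem.Int.bxor start target ∈ togglers.sublists.map xorFold
instance (start : Int) (target : Int) (togglers : List Int) : Decidable (Pre_f start target togglers) := by unfold Pre_f; infer_instance

def pvWitness_f : Int × Int × List Int := (0, 3, [1, 2])

def Spec_f (start : Int) (target : Int) (togglers : List Int) (out : Int) : Prop := out = f_alt start target togglers
instance (start : Int) (target : Int) (togglers : List Int) (out : Int) : Decidable (Spec_f start target togglers out) := by unfold Spec_f; infer_instance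

-- ===== CLAIM (what is proved, stated in full; the proofs are below) =====
def Claim_equal_f : Prop := ∀ (start : Int) (target : Int) (togglers : List Int), Dom_f start target togglers → Pre_f start target togglers → Spec_f start target togglers (f start target togglers)

-- ===== LEMMAS AND PROOFS =====

-- ---------- bxor algebra ----------
theorem bxor_eq_cases : ∀ (a b : Int), PySem.Int.bxor a b =
    match a, b with
    | .ofNat m, .ofNat n => .ofNat (m ^^^ n)
    | .ofNat m, .negSucc n => .negSucc (m ^^^ n)
    | .negSucc m, .ofNat n => .negSucc (m ^^^ n)
    | .negSucc m, .negSucc n => .ofNat (m ^^^ n)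
  | .ofNat m, .ofNat n => by simp [PySem.Int.bxor]
  | .ofNat m, .negSucc n => by simp [PySem.Int.bxor, Int.negSucc_eq]; omega
  | .negSucc m, .ofNat n => by simp [PySem.Int.bxor, Int.negSucc_eq]; omega
  | .negSucc m, .negSucc n => by simp [PySem.Int.bxor, Int.negSucc_eq]; omega

theorem bxor_assoc (a b c : Int) :
    PySem.Int.bxor (PySem.Int.bxor a b) c = PySem.Int.bxor a (PySem.Int.bxor b c) := by
  cases a <;> cases b <;> cases c <;> simp [bxor_eq_cases, Nat.xor_assoc]

theorem bxor_cancel (a b : Int) : PySem.Int.bxor (PySem.Int.bxor a b) b = a := by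
  rw [bxor_assoc, PySem.Int.bxor_self, PySem.Int.bxor_zero]

theorem bxor_swap (a b c : Int) :
    PySem.Int.bxor (PySem.Int.bxor a b) c = PySem.Int.bxor (PySem.Int.bxor a c) b := by
  rw [bxor_assoc, bxor_assoc, PySem.Int.bxor_comm b c]

theorem bxor_inj {a b c : Int} (h : PySem.Int.bxor a c = PySem.Int.bxor b c) : a = b := by
  have := congrArg (fun x => PySem.Int.bxor x c) h
  simpa [bxor_cancel] using this

theorem bxor_eq_right_iff {a b : Int} : PySem.Int.bxor a b = b ↔ a = 0 := by
  constructor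
  · intro h
    have : PySem.Int.bxor a b = PySem.Int.bxor 0 b := by
      rw [h, PySem.Int.bxor_comm, PySem.Int.bxor_zero]
    exact bxor_inj this
  · intro h; rw [h, PySem.Int.bxor_comm, PySem.Int.bxor_zero]

theorem bxor_zero_left (a : Int) : PySem.Int.bxor 0 a = a := by
  rw [PySem.Int.bxor_comm, PySem.Int.bxor_zero]

-- ---------- the XOR reachability relation (spec side) ----------
-- nodes reachable from u in exactly k toggler steps (with multiplicity)
def nbr (ts l : List Int) : List Int := l.flatMap (fun y => ts.map (fun t => PySem.Int.bxor y t))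

def reachL (ts : List Int) (u : Int) : Nat → List Int
  | 0 => [u]
  | k + 1 => nbr ts (reachL ts u k)

theorem mem_nbr {ts l : List Int} {x : Int} :
    x ∈ nbr ts l ↔ ∃ y ∈ l, ∃ t ∈ ts, x = PySem.Int.bxor y t := by
  simp [nbr, eq_comm]

theorem reach_zero {ts : List Int} {u x : Int} : x ∈ reachL ts u 0 ↔ x = u := by
  simp [reachL]

theorem reach_succ {ts : List Int} {u x : Int} {k : Nat} :
    x ∈ reachL ts u (k + 1) ↔ ∃ y ∈ reachL ts u k, ∃ t ∈ ts, x = PySem.Int.bxor y t := by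
  simp [reachL, mem_nbr]

theorem reach_step {ts : List Int} {u y t : Int} {k : Nat} (hy : y ∈ reachL ts u k)
    (ht : t ∈ ts) : PySem.Int.bxor y t ∈ reachL ts u (k + 1) :=
  reach_succ.mpr ⟨y, hy, t, ht, rfl⟩

theorem reach_comp {ts : List Int} {u x y : Int} {k m : Nat}
    (hx : x ∈ reachL ts u k) (hy : y ∈ reachL ts x m) : y ∈ reachL ts u (k + m) := by
  induction m generalizing y with
  | zero => rw [reach_zero] at hy; subst hy; exact hx
  | succ m ih =>
    rcases reach_succ.mp hy with ⟨z, hz, t, ht, rfl⟩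
    exact reach_step (ih hz) ht

theorem reach_sym_mp {ts : List Int} {u x : Int} {k : Nat}
    (h : x ∈ reachL ts u k) : u ∈ reachL ts x k := by
  induction k generalizing x with
  | zero => rw [reach_zero] at h ⊢; exact h.symm
  | succ k ih =>
    rcases reach_succ.mp h with ⟨y, hy, t, ht, rfl⟩
    have h1 : y ∈ reachL ts (PySem.Int.bxor y t) 1 := by
      have hs := reach_step (ts := ts) (u := PySem.Int.bxor y t) (k := 0) (reach_zero.mpr rfl) ht
      rwa [bxor_cancel] at hs
    have := reach_comp h1 (ih hy)
    simpa [Nat.add_comm] using this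

theorem reach_split {ts : List Int} :
    ∀ {k : Nat} {u y : Int}, y ∈ reachL ts u k → ∀ j, j ≤ k →
      ∃ m, m ∈ reachL ts u j ∧ y ∈ reachL ts m (k - j) := by
  intro k
  induction k with
  | zero =>
    intro u y hy j hj
    interval_cases j
    exact ⟨u, reach_zero.mpr rfl, hy⟩
  | succ k ih =>
    intro u y hy j hj
    rcases Nat.lt_or_ge j (k + 1) with hlt | hge
    · rcases reach_succ.mp hy with ⟨z, hz, t, ht, rfl⟩
      rcases ih hz j (by omega) with ⟨m, hm, hzm⟩
      refine ⟨m, hm, ?_⟩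
      have := reach_step hzm ht
      have heq : k - j + 1 = k + 1 - j := by omega
      rwa [heq] at this
    · have : j = k + 1 := by omega
      subst this
      exact ⟨y, hy, by simpa using reach_zero.mpr rfl⟩

theorem reach_shift {ts : List Int} (c : Int) {u x : Int} {k : Nat} :
    x ∈ reachL ts u k ↔ PySem.Int.bxor x c ∈ reachL ts (PySem.Int.bxor u c) k := by
  induction k generalizing x with
  | zero =>
    rw [reach_zero, reach_zero]
    exact ⟨fun h => h ▸ rfl, fun h => bxor_inj h⟩
  | succ k ih =>
    rw [reach_succ, reach_succ]
    constructor
    · rintro ⟨y, hy, t, ht, rfl⟩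
      exact ⟨PySem.Int.bxor y c, ih.mp hy, t, ht, bxor_swap y t c⟩
    · rintro ⟨z, hz, t, ht, hx⟩
      refine ⟨PySem.Int.bxor z c, ?_, t, ht, ?_⟩
      · have : PySem.Int.bxor (PySem.Int.bxor z c) c = z := bxor_cancel z c
        exact ih.mpr (by rwa [this])
      · apply bxor_inj (c := c)
        rw [bxor_swap (PySem.Int.bxor z c) t c, bxor_cancel]
        exact hx

theorem xorFold_cons (u : Int) (l : List Int) :
    xorFold (u :: l) = PySem.Int.bxor u (xorFold l) := rfl

theorem sublist_reach {ts : List Int} :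
    ∀ {S : List Int}, S.Sublist ts → ∀ u, PySem.Int.bxor u (xorFold S) ∈ reachL ts u S.length := by
  intro S
  induction S with
  | nil => intro _ u; simpa [xorFold, PySem.Int.bxor_zero] using reach_zero.mpr rfl
  | cons t S ih =>
    intro hS u
    have ht : t ∈ ts := hS.subset (List.mem_cons_self ..)
    have hS' : S.Sublist ts := List.sublist_of_cons_sublist hS
    have h1 : PySem.Int.bxor u t ∈ reachL ts u 1 := reach_step (reach_zero.mpr rfl) ht
    have h2 := ih hS' (PySem.Int.bxor u t)
    have := reach_comp h1 h2
    have heq : PySem.Int.bxor (PySem.Int.bxor u t) (xorFold S) = PySem.Int.bxor u (xorFold (t :: S)) := by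
      rw [xorFold_cons, ← bxor_assoc]
    rw [heq] at this
    simpa [Nat.add_comm] using this

-- first level at which x is reached from u
def firstAt (ts : List Int) (u : Int) (k : Nat) (x : Int) : Prop :=
  x ∈ reachL ts u k ∧ ∀ j, j < k → x ∉ reachL ts u j

theorem frontier_nonempty {ts : List Int} {u y : Int} {n : Nat}
    (hy : y ∈ reachL ts u n) (hmin : ∀ j, j < n → y ∉ reachL ts u j)
    {j : Nat} (hj : j ≤ n) : ∃ m, firstAt ts u j m ∧ y ∈ reachL ts m (n - j) := by
  rcases reach_split hy j hj with ⟨m, hm, hym⟩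
  refine ⟨m, ⟨hm, ?_⟩, hym⟩
  intro i hi hmi
  have := reach_comp hmi hym
  exact hmin (i + (n - j)) (by omega) this

-- predecessor of a fresh node lies on the exact previous level
theorem fresh_pred {ts : List Int} {u z : Int} {k : Nat}
    (hz : z ∈ reachL ts u (k + 1)) (hfresh : ∀ j, j ≤ k → z ∉ reachL ts u j) :
    ∃ y, firstAt ts u k y ∧ ∃ t ∈ ts, z = PySem.Int.bxor y t := by
  rcases reach_succ.mp hz with ⟨y, hy, t, ht, rfl⟩
  have hex : ∃ j, y ∈ reachL ts u j := ⟨k, hy⟩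
  have hdec : DecidablePred (fun j => y ∈ reachL ts u j) := fun j => by infer_instance
  let j0 := Nat.find hex
  have hj0 : y ∈ reachL ts u j0 := Nat.find_spec hex
  have hj0min : ∀ i, i < j0 → y ∉ reachL ts u i := fun i hi => Nat.find_min hex hi
  have hj0le : j0 ≤ k := Nat.find_min' hex hy
  rcases Nat.lt_or_ge j0 k with hlt | hge
  · exfalso
    exact hfresh (j0 + 1) (by omega) (reach_step hj0 ht)
  · have : j0 = k := by omega
    exact ⟨y, ⟨this ▸ hj0, fun i hi => hj0min i (by omega)⟩, t, ht, rfl⟩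

-- characterization of one level expansion at the spec level
theorem new_level_char {ts : List Int} {u : Int} {k : Nat}
    {fa : List Int} {sa : PySem.Set Int}
    (hfa : ∀ z, z ∈ fa ↔ firstAt ts u k z)
    (hsa : ∀ z, z ∈ sa ↔ ∃ j, j ≤ k ∧ z ∈ reachL ts u j) :
    (∀ z : Int, (z ∈ sa ∨ ∃ x ∈ fa, ∃ t ∈ ts, z = PySem.Int.bxor x t) ↔
        ∃ j, j ≤ k + 1 ∧ z ∈ reachL ts u j) ∧
    (∀ z : Int, (z ∉ sa ∧ ∃ x ∈ fa, ∃ t ∈ ts, z = PySem.Int.bxor x t) ↔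
        firstAt ts u (k + 1) z) := by
  constructor
  · intro z
    constructor
    · rintro (hz | ⟨x, hx, t, ht, rfl⟩)
      · rcases (hsa z).mp hz with ⟨j, hj, hr⟩; exact ⟨j, by omega, hr⟩
      · exact ⟨k + 1, le_refl _, reach_step ((hfa x).mp hx).1 ht⟩
    · rintro ⟨j, hj, hr⟩
      by_cases hzs : z ∈ sa
      · exact Or.inl hzs
      · have hfresh : ∀ i, i ≤ k → z ∉ reachL ts u i := by
          intro i hi hzi
          exact hzs ((hsa z).mpr ⟨i, hi, hzi⟩)
        have hj1 : j = k + 1 := by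
          rcases Nat.lt_or_ge j (k + 1) with h | h
          · exact absurd hr (hfresh j (by omega))
          · omega
        subst hj1
        rcases fresh_pred hr hfresh with ⟨y, hy, t, ht, rfl⟩
        exact Or.inr ⟨y, (hfa y).mpr hy, t, ht, rfl⟩
  · intro z
    constructor
    · rintro ⟨hzs, x, hx, t, ht, rfl⟩
      refine ⟨reach_step ((hfa x).mp hx).1 ht, ?_⟩
      intro j hj hr
      exact hzs ((hsa _).mpr ⟨j, by omega, hr⟩)
    · rintro ⟨hr, hmin⟩
      have hfresh : ∀ i, i ≤ k → z ∉ reachL ts u i := fun i hi => hmin i (by omega)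
      constructor
      · intro hzs
        rcases (hsa z).mp hzs with ⟨j, hj, hrj⟩
        exact hfresh j hj hrj
      · rcases fresh_pred hr hfresh with ⟨y, hy, t, ht, rfl⟩
        exact ⟨y, (hfa y).mpr hy, t, ht, rfl⟩

-- ---------- specs of B's frontier expansion ----------
theorem contains_iff_mem' {l : List Int} {x : Int} :
    PySem.Set.contains l x = true ↔ x ∈ l := List.contains_iff_mem

theorem set_add_eq {seen : PySem.Set Int} {v : Int} (h : v ∉ seen) :
    PySem.Set.add seen v = seen ++ [v] := by
  rw [PySem.Set.add]
  simp [h]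

theorem bInner_spec (x : Int) :
    ∀ (ts' : List Int) (seen : PySem.Set Int) (new : List Int),
      (∀ z, z ∈ (bInner x ts' seen new).1 ↔
          z ∈ seen ∨ ∃ t ∈ ts', z = PySem.Int.bxor x t) ∧
      (∀ z, z ∈ (bInner x ts' seen new).2 ↔
          z ∈ new ∨ (z ∉ seen ∧ ∃ t ∈ ts', z = PySem.Int.bxor x t)) := by
  intro ts'
  induction ts' with
  | nil => intro seen new; simp [bInner]
  | cons t ts ih =>
    intro seen new
    simp only [bInner]
    by_cases hmem : PySem.Int.bxor x t ∈ seen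
    · rw [if_pos (contains_iff_mem'.mpr hmem)]
      obtain ⟨h1, h2⟩ := ih seen new
      constructor
      · intro z
        rw [h1 z]
        constructor
        · rintro (h | ⟨t', ht', rfl⟩)
          · exact Or.inl h
          · exact Or.inr ⟨t', List.mem_cons_of_mem t ht', rfl⟩
        · rintro (h | ⟨t', ht', rfl⟩)
          · exact Or.inl h
          · rcases List.mem_cons.mp ht' with rfl | ht'
            · exact Or.inl hmem
            · exact Or.inr ⟨t', ht', rfl⟩
      · intro z
        rw [h2 z]
        constructor
        · rintro (h | ⟨hz, t', ht', rfl⟩)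
          · exact Or.inl h
          · exact Or.inr ⟨hz, t', List.mem_cons_of_mem t ht', rfl⟩
        · rintro (h | ⟨hz, t', ht', rfl⟩)
          · exact Or.inl h
          · rcases List.mem_cons.mp ht' with rfl | ht'
            · exact absurd hmem hz
            · exact Or.inr ⟨hz, t', ht', rfl⟩
    · rw [if_neg (fun h => hmem (contains_iff_mem'.mp h)), set_add_eq hmem]
      obtain ⟨h1, h2⟩ := ih (seen ++ [PySem.Int.bxor x t]) (new ++ [PySem.Int.bxor x t])
      constructor
      · intro z
        rw [h1 z]
        simp only [List.mem_append, List.mem_singleton]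
        constructor
        · rintro ((h | rfl) | ⟨t', ht', rfl⟩)
          · exact Or.inl h
          · exact Or.inr ⟨t, List.mem_cons_self .., rfl⟩
          · exact Or.inr ⟨t', List.mem_cons_of_mem t ht', rfl⟩
        · rintro (h | ⟨t', ht', rfl⟩)
          · exact Or.inl (Or.inl h)
          · rcases List.mem_cons.mp ht' with rfl | ht'
            · exact Or.inl (Or.inr rfl)
            · exact Or.inr ⟨t', ht', rfl⟩
      · intro z
        rw [h2 z]
        simp only [List.mem_append, List.mem_singleton]
        constructor
        · rintro ((h | rfl) | ⟨hz, t', ht', rfl⟩)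
          · exact Or.inl h
          · exact Or.inr ⟨hmem, t, List.mem_cons_self .., rfl⟩
          · exact Or.inr ⟨fun h => hz (Or.inl h), t', List.mem_cons_of_mem t ht', rfl⟩
        · rintro (h | ⟨hz, t', ht', rfl⟩)
          · exact Or.inl (Or.inl h)
          · rcases List.mem_cons.mp ht' with rfl | ht'
            · exact Or.inl (Or.inr rfl)
            · by_cases hzt : PySem.Int.bxor x t' = PySem.Int.bxor x t
              · exact Or.inl (Or.inr hzt)
              · refine Or.inr ⟨?_, t', ht', rfl⟩
                rintro (h | h)
                · exact hz h
                · exact hzt h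

theorem bLevel_spec (ts : List Int) :
    ∀ (nodes : List Int) (seen : PySem.Set Int) (new : List Int),
      (∀ z, z ∈ (bLevel ts nodes seen new).1 ↔
          z ∈ seen ∨ ∃ x ∈ nodes, ∃ t ∈ ts, z = PySem.Int.bxor x t) ∧
      (∀ z, z ∈ (bLevel ts nodes seen new).2 ↔
          z ∈ new ∨ (z ∉ seen ∧ ∃ x ∈ nodes, ∃ t ∈ ts, z = PySem.Int.bxor x t)) := by
  intro nodes
  induction nodes with
  | nil => intro seen new; simp [bLevel]
  | cons x xs ih =>
    intro seen new
    simp only [bLevel]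
    obtain ⟨hi1, hi2⟩ := bInner_spec x ts seen new
    obtain ⟨hl1, hl2⟩ := ih (bInner x ts seen new).1 (bInner x ts seen new).2
    constructor
    · intro z
      rw [hl1 z]
      constructor
      · rintro (h | ⟨y, hy, t, ht, rfl⟩)
        · rcases (hi1 z).mp h with h | ⟨t, ht, rfl⟩
          · exact Or.inl h
          · exact Or.inr ⟨x, List.mem_cons_self .., t, ht, rfl⟩
        · exact Or.inr ⟨y, List.mem_cons_of_mem x hy, t, ht, rfl⟩
      · rintro (h | ⟨y, hy, t, ht, rfl⟩)
        · exact Or.inl ((hi1 z).mpr (Or.inl h))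
        · rcases List.mem_cons.mp hy with rfl | hy
          · exact Or.inl ((hi1 _).mpr (Or.inr ⟨t, ht, rfl⟩))
          · exact Or.inr ⟨y, hy, t, ht, rfl⟩
    · intro z
      rw [hl2 z]
      constructor
      · rintro (h | ⟨hz, y, hy, t, ht, rfl⟩)
        · rcases (hi2 z).mp h with h | ⟨hz, t, ht, rfl⟩
          · exact Or.inl h
          · exact Or.inr ⟨hz, x, List.mem_cons_self .., t, ht, rfl⟩
        · refine Or.inr ⟨fun hs => hz ((hi1 _).mpr (Or.inl hs)), y, List.mem_cons_of_mem x hy, t, ht, rfl⟩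
      · rintro (h | ⟨hz, y, hy, t, ht, rfl⟩)
        · exact Or.inl ((hi2 z).mpr (Or.inl h))
        · rcases List.mem_cons.mp hy with rfl | hy
          · exact Or.inl ((hi2 _).mpr (Or.inr ⟨hz, t, ht, rfl⟩))
          · by_cases hzi : PySem.Int.bxor y t ∈ (bInner x ts seen new).1
            · rcases (hi1 _).mp hzi with h | ⟨t', ht', heq⟩
              · exact absurd h hz
              · exact Or.inl ((hi2 _).mpr (Or.inr ⟨hz, t', ht', heq⟩))
            · exact Or.inr ⟨hzi, y, hy, t, ht, rfl⟩

-- ---------- correctness of B's bidirectional loop ----------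
-- one side expansion: new seen/frontier characterizations and the meeting test
theorem expand_side {ts : List Int} {s t : Int} {N ka kb : Nat}
    (hNr : t ∈ reachL ts s N) (hNm : ∀ j, j < N → t ∉ reachL ts s j)
    (hlt : ka + kb < N)
    {fa : List Int} {sa sb : PySem.Set Int}
    (hfa : ∀ z, z ∈ fa ↔ firstAt ts s ka z)
    (hsa : ∀ z, z ∈ sa ↔ ∃ j, j ≤ ka ∧ z ∈ reachL ts s j)
    (hsb : ∀ z, z ∈ sb ↔ ∃ j, j ≤ kb ∧ z ∈ reachL ts t j) :
    (∀ z, z ∈ (bLevel ts fa sa []).1 ↔ ∃ j, j ≤ ka + 1 ∧ z ∈ reachL ts s j) ∧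
    (∀ z, z ∈ (bLevel ts fa sa []).2 ↔ firstAt ts s (ka + 1) z) ∧
    (((bLevel ts fa sa []).2.any (fun v => PySem.Set.contains sb v)) = true ↔ N = ka + 1 + kb) := by
  obtain ⟨hch1, hch2⟩ := new_level_char hfa hsa
  obtain ⟨hb1, hb2⟩ := bLevel_spec ts fa sa []
  have hseen : ∀ z, z ∈ (bLevel ts fa sa []).1 ↔ ∃ j, j ≤ ka + 1 ∧ z ∈ reachL ts s j := by
    intro z; rw [hb1 z]; exact hch1 z
  have hnew : ∀ z, z ∈ (bLevel ts fa sa []).2 ↔ firstAt ts s (ka + 1) z := by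
    intro z
    rw [hb2 z]
    simp only [List.mem_nil_iff, false_or]
    exact hch2 z
  refine ⟨hseen, hnew, ?_⟩
  rw [List.any_eq_true]
  constructor
  · rintro ⟨z, hz, hcz⟩
    have hzf := (hnew z).mp hz
    have hzsb := (hsb z).mp (contains_iff_mem'.mp hcz)
    rcases hzsb with ⟨j, hj, hzr⟩
    have : t ∈ reachL ts s (ka + 1 + j) := reach_comp hzf.1 (reach_sym_mp hzr)
    have hge : ¬ (ka + 1 + j < N) := fun h => hNm _ h this
    omega
  · intro hN
    have hsplit := frontier_nonempty hNr hNm (j := ka + 1) (by omega)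
    rcases hsplit with ⟨m, hmf, hmt⟩
    refine ⟨m, (hnew m).mpr hmf, contains_iff_mem'.mpr ((hsb m).mpr ⟨kb, le_refl _, ?_⟩)⟩
    have : N - (ka + 1) = kb := by omega
    exact reach_sym_mp (this ▸ hmt)

theorem bLoop_correct {ts : List Int} {s t : Int} {N : Nat}
    (hNr : t ∈ reachL ts s N) (hNm : ∀ j, j < N → t ∉ reachL ts s j) :
    ∀ (fuel ka kb : Nat) (fa fb : List Int) (sa sb : PySem.Set Int),
      ka + kb < N → N ≤ ka + kb + fuel →
      (∀ z, z ∈ fa ↔ firstAt ts s ka z) →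
      (∀ z, z ∈ sa ↔ ∃ j, j ≤ ka ∧ z ∈ reachL ts s j) →
      (∀ z, z ∈ fb ↔ firstAt ts t kb z) →
      (∀ z, z ∈ sb ↔ ∃ j, j ≤ kb ∧ z ∈ reachL ts t j) →
      bLoop ts fuel fa fb sa sb (ka : Int) (kb : Int) = (N : Int) := by
  have hNr' : s ∈ reachL ts t N := reach_sym_mp hNr
  have hNm' : ∀ j, j < N → s ∉ reachL ts t j := fun j hj h => hNm j hj (reach_sym_mp h)
  intro fuel
  induction fuel with
  | zero => intro ka kb _ _ _ _ h1 h2; omega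
  | succ fuel ih =>
    intro ka kb fa fb sa sb hlt hfuel hfa hsa hfb hsb
    rcases frontier_nonempty hNr hNm (j := ka) (by omega) with ⟨ma, hma, _⟩
    rcases frontier_nonempty hNr' hNm' (j := kb) (by omega) with ⟨mb, hmb, _⟩
    have hfane : fa ≠ [] := fun h => by
      have := (hfa ma).mpr hma; rw [h] at this; exact List.not_mem_nil this
    have hfbne : fb ≠ [] := fun h => by
      have := (hfb mb).mpr hmb; rw [h] at this; exact List.not_mem_nil this
    obtain ⟨xa, fa', rfl⟩ := List.exists_cons_of_ne_nil hfane
    obtain ⟨xb, fb', rfl⟩ := List.exists_cons_of_ne_nil hfbne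
    rw [bLoop]
    by_cases hlen : (xa :: fa').length ≤ (xb :: fb').length
    · rw [if_pos hlen]
      obtain ⟨hseen, hnew, hany⟩ := expand_side hNr hNm hlt hfa hsa hsb
      rcases hbl : bLevel ts (xa :: fa') sa [] with ⟨sa', new⟩
      simp only [hbl] at hseen hnew hany ⊢
      by_cases hmeet : (new.any (fun v => PySem.Set.contains sb v)) = true
      · rw [if_pos hmeet]
        have := hany.mp hmeet
        omega
      · rw [if_neg hmeet]
        have hne : N ≠ ka + 1 + kb := fun h => hmeet (hany.mpr h)
        have hcast : ((ka : Int) + 1) = ((ka + 1 : Nat) : Int) := by push_cast; ring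
        rw [hcast]
        exact ih (ka + 1) kb _ _ _ _ (by omega) (by omega) hnew hseen hfb hsb
    · rw [if_neg hlen]
      have hlt' : kb + ka < N := by omega
      obtain ⟨hseen, hnew, hany⟩ := expand_side hNr' hNm' hlt' hfb hsb hsa
      rcases hbl : bLevel ts (xb :: fb') sb [] with ⟨sb', new⟩
      simp only [hbl] at hseen hnew hany ⊢
      by_cases hmeet : (new.any (fun v => PySem.Set.contains sa v)) = true
      · rw [if_pos hmeet]
        have := hany.mp hmeet
        omega
      · rw [if_neg hmeet]
        have hne : N ≠ kb + 1 + ka := fun h => hmeet (hany.mpr h)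
        have hcast : ((kb : Int) + 1) = ((kb + 1 : Nat) : Int) := by push_cast; ring
        rw [hcast]
        exact ih ka (kb + 1) _ _ _ _ (by omega) (by omega) hfa hsa hnew hseen


-- ---------- A's BFS as a level-synchronized search in difference space ----------
-- (proof-side helpers: the old-style level BFS on d = start ^ target toward 0,
--  used as a bridge between A's FIFO queue and the distance characterization)
def lvlInner (node depth : Int) : List Int → List Int → PySem.Set Int → Sum Int (List Int × PySem.Set Int)
  | [], nxt, seen => .inr (nxt, seen)
  | t :: ts, nxt, seen =>
    let v := PySem.Int.bxor node t
    if PySem.Set.contains seen v then lvlInner node depth ts nxt seen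
    else
      let seen' := PySem.Set.add seen v
      if v = 0 then .inl depth
      else lvlInner node depth ts (nxt ++ [v]) seen'

def lvlLevel (ts : List Int) (depth : Int) : List Int → List Int → PySem.Set Int → Sum Int (List Int × PySem.Set Int)
  | [], nxt, seen => .inr (nxt, seen)
  | node :: rest, nxt, seen =>
    match lvlInner node depth ts nxt seen with
    | .inl r => .inl r
    | .inr (nxt', seen') => lvlLevel ts depth rest nxt' seen'

def lvlLoop (ts : List Int) : Nat → List Int → PySem.Set Int → Int → Int
  | 0, _, _, _ => -1
  | fuel + 1, frontier, seen, depth =>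
    match frontier with
    | [] => -1
    | _ :: _ =>
      match lvlLevel ts (depth + 1) frontier [] seen with
      | .inl r => r
      | .inr (nxt, seen') => lvlLoop ts fuel nxt seen' (depth + 1)

def fLevel (start : Int) (target : Int) (togglers : List Int) : Int :=
  if start = target then 0
  else
    let d := PySem.Int.bxor start target
    lvlLoop togglers (2 ^ togglers.length + 2) [d] (PySem.Set.ofList [d]) 0

-- the XOR-coset of d spanned by the togglers (fuel accounting of the simulation)
def cosetL (d : Int) (ts : List Int) : List Int :=
  ts.sublists.map (fun s => PySem.Int.bxor d (xorFold s))

theorem span_step {ts : List Int} {t : Int} (ht : t ∈ ts) :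
    ∀ {s : List Int}, s.Sublist ts →
      ∃ s', s'.Sublist ts ∧ xorFold s' = PySem.Int.bxor (xorFold s) t := by
  induction ts with
  | nil => cases ht
  | cons u rest ih =>
    intro s hs
    rcases List.sublist_cons_iff.mp hs with hrest | ⟨s₂, rfl, hs₂⟩
    · rcases List.mem_cons.mp ht with rfl | htr
      · exact ⟨t :: s, (hrest.cons₂ t), by
          rw [xorFold_cons, PySem.Int.bxor_comm]⟩
      · rcases ih htr hrest with ⟨s', hs', hx⟩
        exact ⟨s', hs'.trans (List.sublist_cons_self u rest), hx⟩
    · rcases List.mem_cons.mp ht with rfl | htr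
      · exact ⟨s₂, hs₂.trans (List.sublist_cons_self t rest), by
          rw [xorFold_cons, PySem.Int.bxor_comm t (xorFold s₂), bxor_cancel]⟩
      · rcases ih htr hs₂ with ⟨s₂', hs₂', hx⟩
        exact ⟨u :: s₂', hs₂'.cons₂ u, by
          rw [xorFold_cons, xorFold_cons, hx, ← bxor_assoc]⟩

theorem mem_cosetL_bxor {d t : Int} {ts : List Int} (ht : t ∈ ts) {x : Int}
    (hx : x ∈ cosetL d ts) : PySem.Int.bxor x t ∈ cosetL d ts := by
  rcases List.mem_map.mp hx with ⟨s, hsmem, rfl⟩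
  rcases span_step ht (List.mem_sublists.mp hsmem) with ⟨s', hs', hxf⟩
  exact List.mem_map.mpr ⟨s', List.mem_sublists.mpr hs', by
    rw [hxf, ← bxor_assoc]⟩

theorem d_mem_cosetL (d : Int) (ts : List Int) : d ∈ cosetL d ts :=
  List.mem_map.mpr ⟨[], List.mem_sublists.mpr (List.nil_sublist ts), by
    simp [xorFold, PySem.Int.bxor_zero]⟩

-- membership through the bijection (· ^ target)
theorem mem_map_bxor_iff {x target : Int} {l : List Int} :
    PySem.Int.bxor x target ∈ l.map (fun m => PySem.Int.bxor m target) ↔ x ∈ l := by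
  constructor
  · intro h
    rcases List.mem_map.mp h with ⟨m, hm, hx⟩
    rwa [bxor_inj hx.symm]
  · intro h; exact List.mem_map.mpr ⟨x, h, rfl⟩

-- simulation of A's inner toggler loop by the level search's (A's state is the
-- level search's, shifted by ^ target)
theorem inner_sim (target n k : Int) :
    ∀ (ts' : List Int) (nxt : List Int) (seen : PySem.Set Int) (q0 : List (Int × Int)),
    (match innerA target (PySem.Int.bxor n target) k ts'
             (q0 ++ nxt.map (fun m => (PySem.Int.bxor m target, k + 1)))
             (seen.map (fun m => PySem.Int.bxor m target)),
           lvlInner n (k + 1) ts' nxt seen with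
     | .inl r, .inl r' => r = r'
     | .inr (q', v'), .inr (nxt', seen') =>
         ∃ extra, nxt' = nxt ++ extra ∧ seen' = seen ++ extra ∧
           q' = q0 ++ nxt'.map (fun m => (PySem.Int.bxor m target, k + 1)) ∧
           v' = seen'.map (fun m => PySem.Int.bxor m target) ∧
           (∀ m ∈ extra, ∃ t ∈ ts', m = PySem.Int.bxor n t) ∧
           (seen.Nodup → seen'.Nodup)
     | _, _ => False) := by
  intro ts'
  induction ts' with
  | nil =>
    intro nxt seen q0
    simp only [innerA, lvlInner]
    exact ⟨[], by simp⟩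
  | cons t ts ih =>
    intro nxt seen q0
    simp only [innerA, lvlInner]
    have hval : PySem.Int.bxor (PySem.Int.bxor n target) t
        = PySem.Int.bxor (PySem.Int.bxor n t) target := bxor_swap n target t
    by_cases hmem : PySem.Int.bxor n t ∈ seen
    · -- skip branch on both sides
      have hA : PySem.Set.contains (seen.map (fun m => PySem.Int.bxor m target))
          (PySem.Int.bxor (PySem.Int.bxor n target) t) = true := by
        rw [contains_iff_mem', hval]; exact mem_map_bxor_iff.mpr hmem
      have hB : PySem.Set.contains seen (PySem.Int.bxor n t) = true :=
        contains_iff_mem'.mpr hmem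
      simp only [hA, hB, if_pos]
      have h := ih nxt seen q0
      revert h
      match innerA target (PySem.Int.bxor n target) k ts
          (q0 ++ nxt.map (fun m => (PySem.Int.bxor m target, k + 1)))
          (seen.map (fun m => PySem.Int.bxor m target)),
        lvlInner n (k + 1) ts nxt seen with
      | .inl r, .inl r' => exact fun h => h
      | .inl r, .inr p => exact fun h => h
      | .inr p, .inl r => exact fun h => h
      | .inr (q', v'), .inr (nxt', seen') =>
        rintro ⟨extra, h1, h2, h3, h4, hext, hnd⟩
        exact ⟨extra, h1, h2, h3, h4,
          fun m hm => (hext m hm).imp (fun t' ht' => ⟨List.mem_cons_of_mem t ht'.1, ht'.2⟩), hnd⟩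
    · have hA : PySem.Set.contains (seen.map (fun m => PySem.Int.bxor m target))
          (PySem.Int.bxor (PySem.Int.bxor n target) t) = false := by
        rw [Bool.eq_false_iff, Ne, contains_iff_mem', hval]
        exact fun h => hmem (mem_map_bxor_iff.mp h)
      have hB : PySem.Set.contains seen (PySem.Int.bxor n t) = false := by
        rw [Bool.eq_false_iff, Ne, contains_iff_mem']; exact hmem
      simp only [hA, hB, Bool.false_eq_true, if_false]
      have htgt : (PySem.Int.bxor (PySem.Int.bxor n target) t = target)
          ↔ (PySem.Int.bxor n t = 0) := by
        rw [hval]; exact bxor_eq_right_iff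
      by_cases hz : PySem.Int.bxor n t = 0
      · simp only [if_pos (htgt.mpr hz), if_pos hz]
      · simp only [if_neg (fun h => hz (htgt.mp h)), if_neg hz]
        -- add branch: both append the fresh node
        have haddA : PySem.Set.add (seen.map (fun m => PySem.Int.bxor m target))
            (PySem.Int.bxor (PySem.Int.bxor n target) t)
            = (seen ++ [PySem.Int.bxor n t]).map (fun m => PySem.Int.bxor m target) := by
          rw [PySem.Set.add, hA]
          simp [hval]
        have haddB : PySem.Set.add seen (PySem.Int.bxor n t) = seen ++ [PySem.Int.bxor n t] := by
          rw [PySem.Set.add, hB]; simp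
        rw [haddA, haddB]
        have hq : (q0 ++ nxt.map (fun m => (PySem.Int.bxor m target, k + 1)))
            ++ [(PySem.Int.bxor (PySem.Int.bxor n target) t, k + 1)]
            = q0 ++ (nxt ++ [PySem.Int.bxor n t]).map (fun m => (PySem.Int.bxor m target, k + 1)) := by
          simp [hval]
        rw [hq]
        have := ih (nxt ++ [PySem.Int.bxor n t]) (seen ++ [PySem.Int.bxor n t]) q0
        revert this
        match hA' : innerA target (PySem.Int.bxor n target) k ts
            (q0 ++ (nxt ++ [PySem.Int.bxor n t]).map (fun m => (PySem.Int.bxor m target, k + 1)))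
            ((seen ++ [PySem.Int.bxor n t]).map (fun m => PySem.Int.bxor m target)),
          hB' : lvlInner n (k + 1) ts (nxt ++ [PySem.Int.bxor n t]) (seen ++ [PySem.Int.bxor n t]) with
        | .inl r, .inl r' => exact fun h => h
        | .inl r, .inr p => exact fun h => h.elim
        | .inr p, .inl r => exact fun h => h.elim
        | .inr (q', v'), .inr (nxt', seen') =>
          rintro ⟨extra, hnxt, hseen, hq', hv', hext, hnd⟩
          refine ⟨PySem.Int.bxor n t :: extra, by simp [hnxt], by simp [hseen], hq', hv', ?_, ?_⟩
          · intro m hm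
            rcases List.mem_cons.mp hm with rfl | hm
            · exact ⟨t, List.mem_cons_self .., rfl⟩
            · rcases hext m hm with ⟨t', ht', rfl⟩
              exact ⟨t', List.mem_cons_of_mem t ht', rfl⟩
          · intro hnds
            exact hnd (by
              rw [List.nodup_append]
              exact ⟨hnds, List.nodup_singleton _, by intro a ha b hb heq; rw [List.mem_singleton] at hb; subst hb; exact hmem (heq ▸ ha)⟩)

-- main simulation: A's queue at a level boundary is the level search's current and
-- next frontiers, shifted by ^ target and tagged with their depths
theorem main_sim (ts : List Int) (target d : Int) :
    ∀ (fuelB : Nat) (cur : List Int) (fuelA : Nat) (nxt : List Int)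
      (seen : PySem.Set Int) (k : Int) (v0 : Nat),
    seen.Nodup →
    (∀ x ∈ seen, x ∈ cosetL d ts) →
    (∀ x ∈ cur, x ∈ seen) →
    (∀ x ∈ nxt, x ∈ seen) →
    v0 + nxt.length ≤ seen.length →
    (cosetL d ts).toFinset.card + 2 ≤ fuelB + v0 →
    cur.length + nxt.length + ((cosetL d ts).toFinset.card - seen.length) + 1 ≤ fuelA →
    loopA ts target fuelA
        (cur.map (fun m => (PySem.Int.bxor m target, k))
          ++ nxt.map (fun m => (PySem.Int.bxor m target, k + 1)))
        (seen.map (fun m => PySem.Int.bxor m target))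
      = (match lvlLevel ts (k + 1) cur nxt seen with
         | .inl r => r
         | .inr (nxt', seen') => lvlLoop ts fuelB nxt' seen' (k + 1)) := by
  intro fuelB
  induction fuelB with
  | zero =>
    intro cur fuelA nxt seen k v0 hnd hsub _ _ h5 h6 _
    exfalso
    have hlen : seen.length ≤ (cosetL d ts).toFinset.card := by
      rw [← List.toFinset_card_of_nodup hnd]
      exact Finset.card_le_card (fun x hx => by
        rw [List.mem_toFinset] at hx ⊢; exact hsub x hx)
    omega
  | succ fb ihB =>
    intro cur
    induction cur with
    | nil =>
      intro fuelA nxt seen k v0 hnd hsub hcur hnxt h5 h6 h7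
      have hlen : seen.length ≤ (cosetL d ts).toFinset.card := by
        rw [← List.toFinset_card_of_nodup hnd]
        exact Finset.card_le_card (fun x hx => by
          rw [List.mem_toFinset] at hx ⊢; exact hsub x hx)
      match nxt with
      | [] =>
        -- both searches are exhausted: A's queue and the next frontier are empty
        simp only [lvlLevel]
        obtain ⟨fa, rfl⟩ : ∃ fa, fuelA = fa + 1 := ⟨fuelA - 1, by omega⟩
        simp [loopA, lvlLoop]
      | m :: nxt' =>
        -- level shift: the search moves to the next frontier, A's queue is already it
        simp only [lvlLevel, List.map_nil, List.nil_append]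
        simp only [List.length_cons] at h5 h7
        have := ihB (m :: nxt') fuelA [] seen (k + 1) seen.length hnd hsub hnxt
          (by simp) (by simp) (by omega) (by simp; omega)
        simp only [List.map_nil, List.append_nil] at this
        rw [this]
        simp [lvlLoop]
    | cons n cur' ihc =>
      intro fuelA nxt seen k v0 hnd hsub hcur hnxt h5 h6 h7
      have hlen : seen.length ≤ (cosetL d ts).toFinset.card := by
        rw [← List.toFinset_card_of_nodup hnd]
        exact Finset.card_le_card (fun x hx => by
          rw [List.mem_toFinset] at hx ⊢; exact hsub x hx)
      obtain ⟨fa, rfl⟩ : ∃ fa, fuelA = fa + 1 := ⟨fuelA - 1, by omega⟩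
      simp only [List.map_cons, List.cons_append, loopA, lvlLevel]
      have hsim := inner_sim target n k ts nxt seen
        (cur'.map (fun m => (PySem.Int.bxor m target, k)))
      revert hsim
      match hA' : innerA target (PySem.Int.bxor n target) k ts
          (cur'.map (fun m => (PySem.Int.bxor m target, k))
            ++ nxt.map (fun m => (PySem.Int.bxor m target, k + 1)))
          (seen.map (fun m => PySem.Int.bxor m target)),
        hB' : lvlInner n (k + 1) ts nxt seen with
      | .inl r, .inl r' => exact fun h => h ▸ rfl
      | .inl r, .inr p => exact fun h => h.elim
      | .inr p, .inl r => exact fun h => h.elim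
      | .inr (q', v'), .inr (nxt₁, seen₁) =>
        rintro ⟨extra, rfl, rfl, rfl, rfl, hext, hnd'⟩
        have hseen₁sub : ∀ x ∈ seen ++ extra, x ∈ cosetL d ts := by
          intro x hx
          rcases List.mem_append.mp hx with hx | hx
          · exact hsub x hx
          · rcases hext x hx with ⟨t, ht, rfl⟩
            exact mem_cosetL_bxor ht (hsub n (hcur n (List.mem_cons_self ..)))
        have hnd₁ : (seen ++ extra).Nodup := hnd' hnd
        have hlen₁ : (seen ++ extra).length ≤ (cosetL d ts).toFinset.card := by
          rw [← List.toFinset_card_of_nodup hnd₁]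
          exact Finset.card_le_card (fun x hx => by
            rw [List.mem_toFinset] at hx ⊢; exact hseen₁sub x hx)
        have := ihc fa (nxt ++ extra) (seen ++ extra) k v0 hnd₁ hseen₁sub
          (fun x hx => List.mem_append_left _ (hcur x (List.mem_cons_of_mem n hx)))
          (by
            intro x hx
            rcases List.mem_append.mp hx with hx | hx
            · exact List.mem_append_left _ (hnxt x hx)
            · exact List.mem_append_right _ hx)
          (by simp at h5 ⊢; omega)
          h6
          (by simp at h7 hlen₁ ⊢; omega)
        exact this

-- evaluating set([x]) to the one-element list
theorem ofList_singleton (x : Int) : PySem.Set.ofList [x] = [x] := rfl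

theorem f_eq_fLevel (start target : Int) (ts : List Int) :
    f start target ts = fLevel start target ts := by
  unfold f fLevel
  by_cases h : start = target
  · simp [h]
  · simp only [h, if_false]
    set d := PySem.Int.bxor start target with hd
    have hC : (cosetL d ts).toFinset.card ≤ 2 ^ ts.length := by
      calc (cosetL d ts).toFinset.card ≤ (cosetL d ts).length := List.toFinset_card_le _
        _ = ts.sublists.length := by simp [cosetL]
        _ = 2 ^ ts.length := List.length_sublists ts
    have hstart : PySem.Int.bxor d target = start := by rw [hd]; exact bxor_cancel start target
    have hsim := main_sim ts target d (2 ^ ts.length + 1) [d] (2 ^ ts.length + 2) []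
      [d] 0 1
      (List.nodup_singleton d)
      (by intro x hx; rcases List.mem_singleton.mp hx with rfl; exact d_mem_cosetL d ts)
      (fun x hx => hx) (fun x hx => absurd hx (List.not_mem_nil))
      (by simp) (by omega) (by simp; omega)
    simp only [List.map_nil, List.append_nil, List.map_cons, hstart] at hsim
    rw [ofList_singleton, ofList_singleton]
    rw [show (2 : Nat) ^ ts.length + 2 = (2 ^ ts.length + 1) + 1 from rfl]
    simp only [lvlLoop]
    exact hsim

-- ---------- specs of the level search (A-side engine) ----------
theorem lvlInner_hit (node dep : Int) :
    ∀ (ts' nxt : List Int) (seen : PySem.Set Int), (0 : Int) ∉ seen →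
      (∃ t ∈ ts', PySem.Int.bxor node t = 0) →
      lvlInner node dep ts' nxt seen = .inl dep := by
  intro ts'
  induction ts' with
  | nil => rintro _ _ _ ⟨t, ht, _⟩; cases ht
  | cons t ts ih =>
    rintro nxt seen h0 ⟨t', ht', hz⟩
    simp only [lvlInner]
    by_cases hv : PySem.Int.bxor node t = 0
    · have hc : PySem.Set.contains seen (PySem.Int.bxor node t) = false := by
        rw [Bool.eq_false_iff, Ne, contains_iff_mem', hv]; exact h0
      rw [hc]
      simp [hv]
    · rcases List.mem_cons.mp ht' with rfl | ht'
      · exact absurd hz hv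
      · by_cases hc : PySem.Int.bxor node t ∈ seen
        · rw [if_pos (contains_iff_mem'.mpr hc)]
          exact ih nxt seen h0 ⟨t', ht', hz⟩
        · rw [if_neg (fun h => hc (contains_iff_mem'.mp h)), if_neg hv, set_add_eq hc]
          apply ih
          · intro h
            rcases List.mem_append.mp h with h | h
            · exact h0 h
            · exact hv (List.mem_singleton.mp h).symm
          · exact ⟨t', ht', hz⟩

theorem lvlInner_spec (node dep : Int) :
    ∀ (ts' nxt : List Int) (seen : PySem.Set Int), (0 : Int) ∉ seen →
      (∀ t ∈ ts', PySem.Int.bxor node t ≠ 0) →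
      ∃ nxt' seen', lvlInner node dep ts' nxt seen = .inr (nxt', seen') ∧
        (∀ z, z ∈ seen' ↔ z ∈ seen ∨ ∃ t ∈ ts', z = PySem.Int.bxor node t) ∧
        (∀ z, z ∈ nxt' ↔ z ∈ nxt ∨ (z ∉ seen ∧ ∃ t ∈ ts', z = PySem.Int.bxor node t)) ∧
        (0 : Int) ∉ seen' := by
  intro ts'
  induction ts' with
  | nil =>
    intro nxt seen h0 _
    exact ⟨nxt, seen, rfl, by simp, by simp, h0⟩
  | cons t ts ih =>
    intro nxt seen h0 hnz
    simp only [lvlInner]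
    by_cases hmem : PySem.Int.bxor node t ∈ seen
    · rw [if_pos (contains_iff_mem'.mpr hmem)]
      obtain ⟨nxt', seen', heq, h1, h2, h0'⟩ :=
        ih nxt seen h0 (fun t' ht' => hnz t' (List.mem_cons_of_mem t ht'))
      refine ⟨nxt', seen', heq, ?_, ?_, h0'⟩
      · intro z
        rw [h1 z]
        constructor
        · rintro (h | ⟨t', ht', rfl⟩)
          · exact Or.inl h
          · exact Or.inr ⟨t', List.mem_cons_of_mem t ht', rfl⟩
        · rintro (h | ⟨t', ht', rfl⟩)
          · exact Or.inl h
          · rcases List.mem_cons.mp ht' with rfl | ht'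
            · exact Or.inl hmem
            · exact Or.inr ⟨t', ht', rfl⟩
      · intro z
        rw [h2 z]
        constructor
        · rintro (h | ⟨hz, t', ht', rfl⟩)
          · exact Or.inl h
          · exact Or.inr ⟨hz, t', List.mem_cons_of_mem t ht', rfl⟩
        · rintro (h | ⟨hz, t', ht', rfl⟩)
          · exact Or.inl h
          · rcases List.mem_cons.mp ht' with rfl | ht'
            · exact absurd hmem hz
            · exact Or.inr ⟨hz, t', ht', rfl⟩
    · rw [if_neg (fun h => hmem (contains_iff_mem'.mp h)),
        if_neg (hnz t (List.mem_cons_self ..)), set_add_eq hmem]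
      have h0' : (0 : Int) ∉ seen ++ [PySem.Int.bxor node t] := by
        intro h
        rcases List.mem_append.mp h with h | h
        · exact h0 h
        · exact hnz t (List.mem_cons_self ..) (List.mem_singleton.mp h).symm
      obtain ⟨nxt', seen', heq, h1, h2, h0''⟩ :=
        ih (nxt ++ [PySem.Int.bxor node t]) (seen ++ [PySem.Int.bxor node t]) h0'
          (fun t' ht' => hnz t' (List.mem_cons_of_mem t ht'))
      refine ⟨nxt', seen', heq, ?_, ?_, h0''⟩
      · intro z
        rw [h1 z]
        simp only [List.mem_append, List.mem_singleton]
        constructor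
        · rintro ((h | rfl) | ⟨t', ht', rfl⟩)
          · exact Or.inl h
          · exact Or.inr ⟨t, List.mem_cons_self .., rfl⟩
          · exact Or.inr ⟨t', List.mem_cons_of_mem t ht', rfl⟩
        · rintro (h | ⟨t', ht', rfl⟩)
          · exact Or.inl (Or.inl h)
          · rcases List.mem_cons.mp ht' with rfl | ht'
            · exact Or.inl (Or.inr rfl)
            · exact Or.inr ⟨t', ht', rfl⟩
      · intro z
        rw [h2 z]
        simp only [List.mem_append, List.mem_singleton]
        constructor
        · rintro ((h | rfl) | ⟨hz, t', ht', rfl⟩)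
          · exact Or.inl h
          · exact Or.inr ⟨hmem, t, List.mem_cons_self .., rfl⟩
          · exact Or.inr ⟨fun h => hz (Or.inl h), t', List.mem_cons_of_mem t ht', rfl⟩
        · rintro (h | ⟨hz, t', ht', rfl⟩)
          · exact Or.inl (Or.inl h)
          · rcases List.mem_cons.mp ht' with rfl | ht'
            · exact Or.inl (Or.inr rfl)
            · by_cases hzt : PySem.Int.bxor node t' = PySem.Int.bxor node t
              · exact Or.inl (Or.inr hzt)
              · refine Or.inr ⟨?_, t', ht', rfl⟩
                rintro (h | h)
                · exact hz h
                · exact hzt h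

theorem lvlLevel_hit (ts : List Int) (dep : Int) :
    ∀ (nodes nxt : List Int) (seen : PySem.Set Int), (0 : Int) ∉ seen →
      (∃ x ∈ nodes, ∃ t ∈ ts, PySem.Int.bxor x t = 0) →
      lvlLevel ts dep nodes nxt seen = .inl dep := by
  intro nodes
  induction nodes with
  | nil => rintro _ _ _ ⟨x, hx, _⟩; cases hx
  | cons x xs ih =>
    rintro nxt seen h0 ⟨x', hx', t, ht, hz⟩
    simp only [lvlLevel]
    by_cases hx : ∃ t ∈ ts, PySem.Int.bxor x t = 0
    · rw [lvlInner_hit x dep ts nxt seen h0 hx]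
    · obtain ⟨nxt', seen', heq, _, _, h0'⟩ :=
        lvlInner_spec x dep ts nxt seen h0 (fun t' ht' hzz => hx ⟨t', ht', hzz⟩)
      rw [heq]
      rcases List.mem_cons.mp hx' with rfl | hx'
      · exact absurd ⟨t, ht, hz⟩ hx
      · exact ih nxt' seen' h0' ⟨x', hx', t, ht, hz⟩

theorem lvlLevel_spec (ts : List Int) (dep : Int) :
    ∀ (nodes nxt : List Int) (seen : PySem.Set Int), (0 : Int) ∉ seen →
      (∀ x ∈ nodes, ∀ t ∈ ts, PySem.Int.bxor x t ≠ 0) →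
      ∃ nxt' seen', lvlLevel ts dep nodes nxt seen = .inr (nxt', seen') ∧
        (∀ z, z ∈ seen' ↔ z ∈ seen ∨ ∃ x ∈ nodes, ∃ t ∈ ts, z = PySem.Int.bxor x t) ∧
        (∀ z, z ∈ nxt' ↔ z ∈ nxt ∨ (z ∉ seen ∧ ∃ x ∈ nodes, ∃ t ∈ ts, z = PySem.Int.bxor x t)) ∧
        (0 : Int) ∉ seen' := by
  intro nodes
  induction nodes with
  | nil =>
    intro nxt seen h0 _
    exact ⟨nxt, seen, rfl, by simp, by simp, h0⟩
  | cons x xs ih =>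
    intro nxt seen h0 hnz
    simp only [lvlLevel]
    obtain ⟨nxt₁, seen₁, heq₁, hi1, hi2, h0₁⟩ :=
      lvlInner_spec x dep ts nxt seen h0 (hnz x (List.mem_cons_self ..))
    rw [heq₁]
    obtain ⟨nxt', seen', heq, hl1, hl2, h0'⟩ :=
      ih nxt₁ seen₁ h0₁ (fun y hy => hnz y (List.mem_cons_of_mem x hy))
    refine ⟨nxt', seen', heq, ?_, ?_, h0'⟩
    · intro z
      rw [hl1 z]
      constructor
      · rintro (h | ⟨y, hy, t, ht, rfl⟩)
        · rcases (hi1 z).mp h with h | ⟨t, ht, rfl⟩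
          · exact Or.inl h
          · exact Or.inr ⟨x, List.mem_cons_self .., t, ht, rfl⟩
        · exact Or.inr ⟨y, List.mem_cons_of_mem x hy, t, ht, rfl⟩
      · rintro (h | ⟨y, hy, t, ht, rfl⟩)
        · exact Or.inl ((hi1 z).mpr (Or.inl h))
        · rcases List.mem_cons.mp hy with rfl | hy
          · exact Or.inl ((hi1 _).mpr (Or.inr ⟨t, ht, rfl⟩))
          · exact Or.inr ⟨y, hy, t, ht, rfl⟩
    · intro z
      rw [hl2 z]
      constructor
      · rintro (h | ⟨hz, y, hy, t, ht, rfl⟩)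
        · rcases (hi2 z).mp h with h | ⟨hz, t, ht, rfl⟩
          · exact Or.inl h
          · exact Or.inr ⟨hz, x, List.mem_cons_self .., t, ht, rfl⟩
        · refine Or.inr ⟨fun hs => hz ((hi1 _).mpr (Or.inl hs)), y, List.mem_cons_of_mem x hy, t, ht, rfl⟩
      · rintro (h | ⟨hz, y, hy, t, ht, rfl⟩)
        · exact Or.inl ((hi2 z).mpr (Or.inl h))
        · rcases List.mem_cons.mp hy with rfl | hy
          · exact Or.inl ((hi2 _).mpr (Or.inr ⟨hz, t, ht, rfl⟩))
          · by_cases hzi : PySem.Int.bxor y t ∈ seen₁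
            · rcases (hi1 _).mp hzi with h | ⟨t', ht', heq'⟩
              · exact absurd h hz
              · exact Or.inl ((hi2 _).mpr (Or.inr ⟨hz, t', ht', heq'⟩))
            · exact Or.inr ⟨hzi, y, hy, t, ht, rfl⟩

-- ---------- correctness of the level search ----------
theorem lvlLoop_correct {ts : List Int} {d : Int} {N : Nat}
    (hNr : (0 : Int) ∈ reachL ts d N) (hNm : ∀ j, j < N → (0 : Int) ∉ reachL ts d j) :
    ∀ (fuel k : Nat) (frontier : List Int) (seen : PySem.Set Int),
      k < N → N ≤ k + fuel →
      (∀ z, z ∈ frontier ↔ firstAt ts d k z) →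
      (∀ z, z ∈ seen ↔ ∃ j, j ≤ k ∧ z ∈ reachL ts d j) →
      lvlLoop ts fuel frontier seen (k : Int) = (N : Int) := by
  intro fuel
  induction fuel with
  | zero => intro k _ _ h1 h2; omega
  | succ fuel ih =>
    intro k frontier seen hk hfuel hfr hseen
    rcases frontier_nonempty hNr hNm (j := k) (by omega) with ⟨m, hm, _⟩
    have hfne : frontier ≠ [] := fun h => by
      have := (hfr m).mpr hm; rw [h] at this; exact List.not_mem_nil this
    obtain ⟨x0, fr', rfl⟩ := List.exists_cons_of_ne_nil hfne
    have h0 : (0 : Int) ∉ seen := by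
      intro h
      rcases (hseen 0).mp h with ⟨j, hj, hr⟩
      exact hNm j (by omega) hr
    rw [lvlLoop]
    by_cases hhit : N = k + 1
    · rcases reach_succ.mp (hhit ▸ hNr) with ⟨y, hy, t, ht, h0eq⟩
      have hyf : firstAt ts d k y := by
        refine ⟨hy, fun j hj hyj => ?_⟩
        exact hNm (j + 1) (by omega) (h0eq ▸ reach_step hyj ht)
      have := lvlLevel_hit ts ((k : Int) + 1) (x0 :: fr') [] seen h0
        ⟨y, (hfr y).mpr hyf, t, ht, h0eq.symm⟩
      rw [this]
      simp only
      omega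
    · have hnz : ∀ x ∈ x0 :: fr', ∀ t ∈ ts, PySem.Int.bxor x t ≠ 0 := by
        intro x hx t ht hz
        have : (0 : Int) ∈ reachL ts d (k + 1) := hz ▸ reach_step ((hfr x).mp hx).1 ht
        exact hNm (k + 1) (by omega) this
      obtain ⟨nxt', seen', heq, h1, h2, _⟩ :=
        lvlLevel_spec ts ((k : Int) + 1) (x0 :: fr') [] seen h0 hnz
      rw [heq]
      obtain ⟨hch1, hch2⟩ := new_level_char hfr hseen
      have hseen' : ∀ z, z ∈ seen' ↔ ∃ j, j ≤ k + 1 ∧ z ∈ reachL ts d j := by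
        intro z; rw [h1 z]; exact hch1 z
      have hnxt' : ∀ z, z ∈ nxt' ↔ firstAt ts d (k + 1) z := by
        intro z
        rw [h2 z]
        simp only [List.mem_nil_iff, false_or]
        exact hch2 z
      have hcast : ((k : Int) + 1) = ((k + 1 : Nat) : Int) := by push_cast; ring
      rw [hcast]
      exact ih (k + 1) nxt' seen' (by omega) (by omega) hnxt' hseen'

-- ---------- final assembly ----------
theorem f_eq_f_alt (start target : Int) (ts : List Int)
    (hpre : Pre_f start target ts) : f start target ts = f_alt start target ts := by
  by_cases h : start = target
  · unfold f f_alt; simp [h]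
  · rcases hpre with h' | hmem
    · exact absurd h' h
    · rcases List.mem_map.mp hmem with ⟨S, hSmem, hxf⟩
      have hS : S.Sublist ts := List.mem_sublists.mp hSmem
      have htr : target ∈ reachL ts start S.length := by
        have := sublist_reach hS start
        rwa [hxf, ← bxor_assoc, PySem.Int.bxor_self, bxor_zero_left] at this
      have hex : ∃ k, target ∈ reachL ts start k := ⟨S.length, htr⟩
      have hNr : target ∈ reachL ts start (Nat.find hex) := Nat.find_spec hex
      have hNm : ∀ j, j < Nat.find hex → target ∉ reachL ts start j :=
        fun j hj => Nat.find_min hex hj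
      set N := Nat.find hex with hN
      have hN0 : 0 < N := by
        rcases Nat.eq_zero_or_pos N with h0 | h0
        · exact absurd (reach_zero.mp (h0 ▸ hNr)).symm h
        · exact h0
      have hNle : N ≤ ts.length :=
        le_trans (Nat.find_min' hex htr) hS.length_le
      have hpow : ts.length < 2 ^ ts.length := Nat.lt_two_pow_self
      -- B's side
      have hB : f_alt start target ts = (N : Int) := by
        unfold f_alt
        rw [if_neg h, ofList_singleton, ofList_singleton]
        have := bLoop_correct hNr hNm (2 ^ ts.length + 2) 0 0 [start] [target]
          [start] [target] (by omega) (by omega)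
          (by
            intro z
            simp only [List.mem_singleton]
            constructor
            · rintro rfl
              exact ⟨reach_zero.mpr rfl, fun j hj => absurd hj (Nat.not_lt_zero j)⟩
            · rintro ⟨hz, _⟩
              exact reach_zero.mp hz)
          (by
            intro z
            simp only [List.mem_singleton]
            constructor
            · rintro rfl; exact ⟨0, le_refl _, reach_zero.mpr rfl⟩
            · rintro ⟨j, hj, hz⟩
              interval_cases j
              exact reach_zero.mp hz)
          (by
            intro z
            simp only [List.mem_singleton]
            constructor
            · rintro rfl
              exact ⟨reach_zero.mpr rfl, fun j hj => absurd hj (Nat.not_lt_zero j)⟩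
            · rintro ⟨hz, _⟩
              exact reach_zero.mp hz)
          (by
            intro z
            simp only [List.mem_singleton]
            constructor
            · rintro rfl; exact ⟨0, le_refl _, reach_zero.mpr rfl⟩
            · rintro ⟨j, hj, hz⟩
              interval_cases j
              exact reach_zero.mp hz)
        simpa using this
      -- A's side, through the level search in difference space
      have hshift0 : (0 : Int) ∈ reachL ts (PySem.Int.bxor start target) N := by
        have := (reach_shift (ts := ts) target (u := start) (x := target) (k := N)).mp hNr
        rwa [PySem.Int.bxor_self] at this
      have hshiftm : ∀ j, j < N → (0 : Int) ∉ reachL ts (PySem.Int.bxor start target) j := by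
        intro j hj hmem0
        apply hNm j hj
        apply (reach_shift (ts := ts) target (u := start) (x := target) (k := j)).mpr
        rwa [PySem.Int.bxor_self]
      have hA : f start target ts = (N : Int) := by
        rw [f_eq_fLevel]
        unfold fLevel
        rw [if_neg h]
        show lvlLoop ts (2 ^ ts.length + 2) [PySem.Int.bxor start target]
          (PySem.Set.ofList [PySem.Int.bxor start target]) 0 = (N : Int)
        rw [ofList_singleton]
        have := lvlLoop_correct hshift0 hshiftm (2 ^ ts.length + 2) 0
          [PySem.Int.bxor start target] [PySem.Int.bxor start target]
          (by omega) (by omega)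
          (by
            intro z
            simp only [List.mem_singleton]
            constructor
            · rintro rfl
              exact ⟨reach_zero.mpr rfl, fun j hj => absurd hj (Nat.not_lt_zero j)⟩
            · rintro ⟨hz, _⟩
              exact reach_zero.mp hz)
          (by
            intro z
            simp only [List.mem_singleton]
            constructor
            · rintro rfl; exact ⟨0, le_refl _, reach_zero.mpr rfl⟩
            · rintro ⟨j, hj, hz⟩
              interval_cases j
              exact reach_zero.mp hz)
        simpa using this
      rw [hA, hB]

-- ===== VERDICT (by name: the statement is the Claim_ definition above) =====
theorem f_spec : Claim_equal_f := by
  intro start target togglers _ hpre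
  unfold Spec_f
  exact f_eq_f_alt start target togglers hpre
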